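-- pv_equiv track=rewrite | github.com/DarkAlexWang/leetcode | Amazon/OnlineAssessment/grid_climbing.py | grid_climbing
-- ===== SOURCE A (Python) =====
-- def grid_climbing(grid):
--     prev = 0
--     connections = 0
--
--     for row in grid:
--         sum_ = 0
--         for n in row:
--             sum_ += n
--
--         if sum_ > 0:
--             connections += prev * sum_
--             prev = sum_
--     return connections
-- ===== SOURCE B (Python) =====
-- def grid_climbing(grid):
--     # Divide and conquer: solve(lo, hi) returns (total, first, last) for rows lo..hi,
--     # where total is the sum of products of adjacent positive row sums within the
--     # segment and first/last are the segment's first/last positive row sum (or None).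
--     # Merging adds the single cross product between the halves.
--     def solve(lo, hi):
--         if lo == hi:
--             return (0, None, None)
--         if hi - lo == 1:
--             s = sum(grid[lo])
--             return (0, s, s) if s > 0 else (0, None, None)
--         mid = (lo + hi) // 2
--         tl, fl, ll = solve(lo, mid)
--         tr, fr, lr = solve(mid, hi)
--         cross = ll * fr if ll is not None and fr is not None else 0
--         first = fl if fl is not None else fr
--         last = lr if lr is not None else ll
--         return (tl + tr + cross, first, last)
--     return solve(0, len(grid))[0]
-- ===== Notes on version B (the rewrite author's own statement) =====
-- stated objective: alternative
-- what changed: Replaces A's single forward loop threading a running prev accumulator with a divide-and-conquer recursion: each half returns (segment total, first/last positive row sum) and the merge adds one cross product between the halves.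
import Mathlib
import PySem

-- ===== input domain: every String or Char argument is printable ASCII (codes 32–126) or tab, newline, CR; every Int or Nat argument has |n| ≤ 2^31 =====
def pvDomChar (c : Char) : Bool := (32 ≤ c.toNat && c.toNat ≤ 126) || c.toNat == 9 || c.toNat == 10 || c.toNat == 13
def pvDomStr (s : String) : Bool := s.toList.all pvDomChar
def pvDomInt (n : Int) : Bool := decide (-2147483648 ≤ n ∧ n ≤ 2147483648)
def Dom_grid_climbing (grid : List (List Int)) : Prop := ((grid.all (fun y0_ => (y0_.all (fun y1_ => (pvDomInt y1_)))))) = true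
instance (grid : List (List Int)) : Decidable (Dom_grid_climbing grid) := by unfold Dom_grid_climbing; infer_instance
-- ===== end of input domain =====

-- B replaces A's forward prev-threading loop by a divide-and-conquer recursion that
-- merges (total, first/last positive row sum) of the two halves; objective: alternative.

-- ===== PORT A =====
-- state = (prev, connections), exactly A's loop
def grid_climbing (grid : List (List Int)) : Int :=
  (grid.foldl
    (fun (st : Int × Int) row =>
      let sum_ := row.foldl (fun a n => a + n) 0
      if sum_ > 0 then (sum_, st.2 + st.1 * sum_) else st)
    (0, 0)).2

-- ===== PORT B =====
-- solve(lo, hi) on the segment of rows; here the segment itself is the argument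
-- (Python's mid = (lo+hi)//2 splits a length-n segment into n/2 and n - n/2).
def gc_solve : List (List Int) → Int × Option Int × Option Int
  | [] => (0, none, none)
  | [row] =>
    if row.foldl (fun a n => a + n) 0 > 0 then
      (0, some (row.foldl (fun a n => a + n) 0), some (row.foldl (fun a n => a + n) 0))
    else (0, none, none)
  | a :: b :: rest =>
    let l := a :: b :: rest
    let (tl, fl, ll) := gc_solve (l.take (l.length / 2))
    let (tr, fr, lr) := gc_solve (l.drop (l.length / 2))
    let cross := match ll, fr with
      | some a, some b => a * b
      | _, _ => 0
    let first := match fl with | some a => some a | none => fr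
    let last := match lr with | some a => some a | none => ll
    (tl + tr + cross, first, last)
termination_by l => l.length
decreasing_by
  · simp; omega
  · simp; omega

def grid_climbing_alt (grid : List (List Int)) : Int :=
  (gc_solve grid).1

-- ===== PRECONDITION & SPEC =====
def Spec_grid_climbing (grid : List (List Int)) (out : Int) : Prop := out = grid_climbing_alt grid
instance (grid : List (List Int)) (out : Int) : Decidable (Spec_grid_climbing grid out) := by unfold Spec_grid_climbing; infer_instance

-- ===== CLAIM (what is proved, stated in full; the proofs are below) =====
def Claim_equal_grid_climbing : Prop := ∀ (grid : List (List Int)), Dom_grid_climbing grid → Spec_grid_climbing grid (grid_climbing grid)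

-- ===== LEMMAS AND PROOFS =====

-- the list of positive row sums
def gc_pos (grid : List (List Int)) : List Int :=
  grid.filterMap (fun row =>
    let s := row.foldl (fun a n => a + n) 0
    if s > 0 then some s else none)

-- sum of products of adjacent elements
def adjP : List Int → Int
  | a :: b :: r => a * b + adjP (b :: r)
  | _ => 0

def optCross : Option Int → Option Int → Int
  | some a, some b => a * b
  | _, _ => 0

-- sum of adjacent products of (prev :: l)
def gc_adj (prev : Int) : List Int → Int
  | [] => 0
  | s :: rest => prev * s + gc_adj s rest

lemma gc_foldA (grid : List (List Int)) (prev conn : Int) :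
    (grid.foldl
      (fun (st : Int × Int) row =>
        let sum_ := row.foldl (fun a n => a + n) 0
        if sum_ > 0 then (sum_, st.2 + st.1 * sum_) else st)
      (prev, conn)).2 = conn + gc_adj prev (gc_pos grid) := by
  induction grid generalizing prev conn with
  | nil => simp [gc_pos, gc_adj]
  | cons row rest ih =>
    simp only [List.foldl_cons, gc_pos, List.filterMap_cons]
    by_cases h : row.foldl (fun a n => a + n) 0 > 0
    · simp only [if_pos h]
      rw [ih]
      simp only [gc_adj, gc_pos]
      ring
    · simp only [if_neg h]
      rw [ih]
      simp [gc_pos]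

lemma adjP_cons (a : Int) (xs : List Int) :
    adjP (a :: xs) = optCross (some a) xs.head? + adjP xs := by
  cases xs <;> simp [adjP, optCross]

lemma gc_adj_eq (a : Int) (l : List Int) :
    gc_adj a l = optCross (some a) l.head? + adjP l := by
  induction l generalizing a with
  | nil => simp [gc_adj, adjP, optCross]
  | cons s rest ih =>
    rw [adjP_cons]
    simp only [gc_adj, ih, List.head?_cons]
    cases rest.head? <;> simp [optCross]

lemma adjP_append (L R : List Int) :
    adjP (L ++ R) = adjP L + adjP R + optCross L.getLast? R.head? := by
  induction L with
  | nil => simp [adjP, optCross]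
  | cons a L ih =>
    rw [List.cons_append, adjP_cons, ih, adjP_cons]
    cases L with
    | nil =>
      cases h : R.head? <;> simp [h, optCross, adjP]
      ring
    | cons c L' => simp [optCross]; ring

lemma gc_pos_append (L R : List (List Int)) :
    gc_pos (L ++ R) = gc_pos L ++ gc_pos R := by
  simp [gc_pos]

lemma gc_solve_eq (l : List (List Int)) :
    gc_solve l = (adjP (gc_pos l), (gc_pos l).head?, (gc_pos l).getLast?) := by
  induction l using gc_solve.induct with
  | case1 => simp [gc_solve, gc_pos, adjP]
  | case2 row hs =>
    have hs' : 0 < List.foldl (fun a n => a + n) 0 row := by simpa using hs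
    simp [gc_solve, gc_pos, adjP, hs']
  | case3 row hs =>
    have hs' : ¬ 0 < List.foldl (fun a n => a + n) 0 row := by simpa using hs
    simp [gc_solve, gc_pos, adjP, hs']
  | case4 a b rest dL tl fl ll hT tr fr lr hD ihl ihr =>
    have edl : dL = a :: b :: rest := rfl
    rw [edl] at hT hD ihl ihr
    have hsplit : a :: b :: rest =
        (a :: b :: rest).take ((a :: b :: rest).length / 2) ++
        (a :: b :: rest).drop ((a :: b :: rest).length / 2) := by simp
    rw [gc_solve, ihl, ihr]
    conv_rhs => rw [hsplit]
    rw [gc_pos_append, adjP_append]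
    cases hL : (gc_pos ((a :: b :: rest).take ((a :: b :: rest).length / 2))) with
    | nil =>
      simp [optCross]
      generalize (gc_pos (List.drop ((rest.length + 1 + 1) / 2) (a :: b :: rest))).getLast? = o
      cases o <;> rfl
    | cons x xs =>
      cases hR : (gc_pos ((a :: b :: rest).drop ((a :: b :: rest).length / 2))) with
      | nil => simp [optCross]
      | cons y ys =>
        simp [optCross]
        cases hy : (y :: ys).getLast? with
        | none => simp at hy
        | some v =>
          simp
          have e2 : x :: (xs ++ y :: ys) = (x :: xs) ++ (y :: ys) := by simp
          rw [e2, List.getLast?_append, hy]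
          simp
-- PLACEHOLDER
-- ===== VERDICT (by name: the statement is the Claim_ definition above) =====
theorem grid_climbing_spec : Claim_equal_grid_climbing := by
  intro grid _
  unfold Spec_grid_climbing grid_climbing grid_climbing_alt
  rw [gc_foldA, gc_solve_eq, gc_adj_eq]
  simp [optCross]
  cases h : (gc_pos grid).head? <;> simp
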